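-- pv_equiv track=rewrite | github.com/IPSPoDD/IPSPoDD-iti0102-2019 | ex03_idcode/idcode.py | get_birth_place
-- ===== SOURCE A (Python) =====
-- def get_birth_place(birth_number: int) -> str:
--     """
--     Find the place where the person was born.
--
--     Possible locations are following: Kuressaare, Tartu, Tallinn, Kohtla-Järve, Narva, Pärnu,
--     Paide, Rakvere, Valga, Viljandi, Võru and undefined. Lastly if the number is incorrect the function must return
--     the following 'Wrong input!'
--     :param birth_number: int
--     :return: str
--     """
--     if 1 <= birth_number <= 999:
--         dict_birth = {
--             range(1, 11): "Kuressaare",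
--             range(11, 21): "Tartu",
--             range(21, 221): "Tallinn",
--             range(221, 271): "Kohtla-Järve",
--             range(271, 371): "Tartu",
--             range(371, 421): "Narva",
--             range(421, 471): "Pärnu",
--             range(471, 491): "Tallinn",
--             range(491, 521): "Paide",
--             range(521, 571): "Rakvere",
--             range(571, 601): "Valga",
--             range(601, 651): "Viljandi",
--             range(651, 711): "Võru",
--             range(710, 1000): "undefined"
--         }
--         for key in dict_birth:
--             if birth_number in key:
--                 return dict_birth[key]
--     else:
--         return "Wrong input!"
-- ===== SOURCE B (Python) =====
-- THRESHOLDS = [11, 21, 221, 271, 371, 421, 471, 491, 521, 571, 601, 651, 711, 1000]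
-- NAMES = ["Kuressaare", "Tartu", "Tallinn", "Kohtla-Järve", "Tartu", "Narva", "Pärnu",
--          "Tallinn", "Paide", "Rakvere", "Valga", "Viljandi", "Võru", "undefined"]
--
--
-- def get_birth_place(birth_number: int) -> str:
--     """Binary search over sorted upper-bound thresholds instead of scanning ranges."""
--     if not (1 <= birth_number <= 999):
--         return "Wrong input!"
--     lo, hi = 0, len(THRESHOLDS)
--     while lo < hi:  # bisect_right by hand
--         mid = (lo + hi) // 2
--         if THRESHOLDS[mid] <= birth_number:
--             lo = mid + 1
--         else:
--             hi = mid
--     return NAMES[lo]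
-- ===== Notes on version B (the rewrite author's own statement) =====
-- stated objective: idiomatic
-- what changed: Replaced the linear scan over range-keyed dict entries with a hand-written bisect_right binary search over a sorted list of upper-bound thresholds paired with a names table (Voru/undefined boundary set at 711 to match A's dict-order precedence on the overlap at 710).
import Mathlib
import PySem

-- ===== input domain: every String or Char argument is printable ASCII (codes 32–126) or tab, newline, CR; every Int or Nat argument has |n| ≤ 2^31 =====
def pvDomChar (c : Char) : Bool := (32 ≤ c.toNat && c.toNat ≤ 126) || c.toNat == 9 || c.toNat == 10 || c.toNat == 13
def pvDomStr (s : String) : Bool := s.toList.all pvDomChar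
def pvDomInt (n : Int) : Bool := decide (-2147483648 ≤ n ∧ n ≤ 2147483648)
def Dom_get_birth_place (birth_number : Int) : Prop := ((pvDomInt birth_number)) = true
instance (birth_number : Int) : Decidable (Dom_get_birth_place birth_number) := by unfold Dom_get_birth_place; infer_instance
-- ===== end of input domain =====

-- B replaces A's linear scan over range-keyed dict entries by a binary search over sorted upper-bound thresholds (idiomatic bisect_right).

-- ===== PORT A =====
-- A's dict with range keys, in insertion order: ((lo,hi), name) means range(lo,hi).
def tableA : List ((Int × Int) × String) :=
  [((1, 11), "Kuressaare"), ((11, 21), "Tartu"), ((21, 221), "Tallinn"),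
   ((221, 271), "Kohtla-Järve"), ((271, 371), "Tartu"), ((371, 421), "Narva"),
   ((421, 471), "Pärnu"), ((471, 491), "Tallinn"), ((491, 521), "Paide"),
   ((521, 571), "Rakvere"), ((571, 601), "Valga"), ((601, 651), "Viljandi"),
   ((651, 711), "Võru"), ((710, 1000), "undefined")]

-- the `for key in dict_birth` loop: first range containing n wins
def loopA (n : Int) : List ((Int × Int) × String) → Option String
  | [] => none
  | ((lo, hi), name) :: rest => if lo ≤ n ∧ n < hi then some name else loopA n rest

def get_birth_place (birth_number : Int) : String :=
  if 1 ≤ birth_number ∧ birth_number ≤ 999 then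
    -- the `.getD ""` branch is unreachable: the ranges cover 1..999 (Python would return None)
    (loopA birth_number tableA).getD ""
  else "Wrong input!"

-- ===== PORT B =====
def thresholdsB : List Int := [11, 21, 221, 271, 371, 421, 471, 491, 521, 571, 601, 651, 711, 1000]
def namesB : List String :=
  ["Kuressaare", "Tartu", "Tallinn", "Kohtla-Järve", "Tartu", "Narva", "Pärnu",
   "Tallinn", "Paide", "Rakvere", "Valga", "Viljandi", "Võru", "undefined"]

-- Source B's while-loop (bisect_right); fuel only makes the loop total; 5 iterations always suffice for 14 thresholds
def bsearchB (n : Int) : Nat → Nat → Nat → Nat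
  | 0, lo, _ => lo
  | fuel + 1, lo, hi =>
    if lo < hi then
      let mid := (lo + hi) / 2
      if thresholdsB.getD mid 0 ≤ n then bsearchB n fuel (mid + 1) hi
      else bsearchB n fuel lo mid
    else lo

def get_birth_place_alt (birth_number : Int) : String :=
  if ¬ (1 ≤ birth_number ∧ birth_number ≤ 999) then "Wrong input!"
  else namesB.getD (bsearchB birth_number 5 0 thresholdsB.length) ""

-- ===== PRECONDITION & SPEC =====
def Spec_get_birth_place (birth_number : Int) (out : String) : Prop := out = get_birth_place_alt birth_number
instance (birth_number : Int) (out : String) : Decidable (Spec_get_birth_place birth_number out) := by unfold Spec_get_birth_place; infer_instance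

-- ===== CLAIM (what is proved, stated in full; the proofs are below) =====
def Claim_equal_get_birth_place : Prop := ∀ (birth_number : Int), Dom_get_birth_place birth_number → Spec_get_birth_place birth_number (get_birth_place birth_number)

-- ===== LEMMAS AND PROOFS =====
-- agreement on all in-range inputs, checked by kernel evaluation
theorem loopA_pos (n lo hi : Int) (name : String) (rest : List ((Int × Int) × String))
    (h : lo ≤ n ∧ n < hi) : loopA n (((lo, hi), name) :: rest) = some name := by
  simp [loopA, h]

theorem loopA_neg (n lo hi : Int) (name : String) (rest : List ((Int × Int) × String))
    (h : ¬(lo ≤ n ∧ n < hi)) : loopA n (((lo, hi), name) :: rest) = loopA n rest := by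
  simp [loopA, h]

theorem bs_le (n : Int) (fuel lo hi : Nat) (hlh : lo < hi)
    (h : thresholdsB.getD ((lo + hi) / 2) 0 ≤ n) :
    bsearchB n (fuel + 1) lo hi = bsearchB n fuel ((lo + hi) / 2 + 1) hi := by
  simp only [List.getD] at h
  simp [bsearchB, hlh, h]

theorem bs_gt (n : Int) (fuel lo hi : Nat) (hlh : lo < hi)
    (h : ¬ thresholdsB.getD ((lo + hi) / 2) 0 ≤ n) :
    bsearchB n (fuel + 1) lo hi = bsearchB n fuel lo ((lo + hi) / 2) := by
  simp only [List.getD] at h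
  simp [bsearchB, hlh, h]

theorem bs_done (n : Int) (fuel lo hi : Nat) (hlh : ¬ lo < hi) :
    bsearchB n (fuel + 1) lo hi = lo := by
  simp [bsearchB, hlh]

theorem pvA_0 (n : Int) (h1 : (1:Int) ≤ n) (h2 : n < 11) : get_birth_place n = "Kuressaare" := by
  unfold get_birth_place tableA
  rw [if_pos (by omega : (1:Int) ≤ n ∧ n ≤ 999),
    loopA_pos n 1 11 _ _ ⟨by omega, by omega⟩]
  rfl

theorem pvB_0 (n : Int) (h1 : (1:Int) ≤ n) (h2 : n < 11) : get_birth_place_alt n = "Kuressaare" := by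
  unfold get_birth_place_alt
  rw [if_neg (by omega : ¬¬((1:Int) ≤ n ∧ n ≤ 999))]
  have hb : bsearchB n 5 0 thresholdsB.length = 0 := by
    rw [show thresholdsB.length = 14 by rfl,
      bs_gt n 4 0 14 (by norm_num) (by norm_num [thresholdsB]; omega),
      bs_gt n 3 0 7 (by norm_num) (by norm_num [thresholdsB]; omega),
      bs_gt n 2 0 3 (by norm_num) (by norm_num [thresholdsB]; omega),
      bs_gt n 1 0 1 (by norm_num) (by norm_num [thresholdsB]; omega),
      bs_done n 0 0 0 (by norm_num)]
  rw [hb]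
  rfl

theorem pvA_1 (n : Int) (h1 : (11:Int) ≤ n) (h2 : n < 21) : get_birth_place n = "Tartu" := by
  unfold get_birth_place tableA
  rw [if_pos (by omega : (1:Int) ≤ n ∧ n ≤ 999),
    loopA_neg n 1 11 _ _ (by omega),
    loopA_pos n 11 21 _ _ ⟨by omega, by omega⟩]
  rfl

theorem pvB_1 (n : Int) (h1 : (11:Int) ≤ n) (h2 : n < 21) : get_birth_place_alt n = "Tartu" := by
  unfold get_birth_place_alt
  rw [if_neg (by omega : ¬¬((1:Int) ≤ n ∧ n ≤ 999))]
  have hb : bsearchB n 5 0 thresholdsB.length = 1 := by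
    rw [show thresholdsB.length = 14 by rfl,
      bs_gt n 4 0 14 (by norm_num) (by norm_num [thresholdsB]; omega),
      bs_gt n 3 0 7 (by norm_num) (by norm_num [thresholdsB]; omega),
      bs_gt n 2 0 3 (by norm_num) (by norm_num [thresholdsB]; omega),
      bs_le n 1 0 1 (by norm_num) (by norm_num [thresholdsB]; omega),
      bs_done n 0 1 1 (by norm_num)]
  rw [hb]
  rfl

theorem pvA_2 (n : Int) (h1 : (21:Int) ≤ n) (h2 : n < 221) : get_birth_place n = "Tallinn" := by
  unfold get_birth_place tableA
  rw [if_pos (by omega : (1:Int) ≤ n ∧ n ≤ 999),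
    loopA_neg n 1 11 _ _ (by omega),
    loopA_neg n 11 21 _ _ (by omega),
    loopA_pos n 21 221 _ _ ⟨by omega, by omega⟩]
  rfl

theorem pvB_2 (n : Int) (h1 : (21:Int) ≤ n) (h2 : n < 221) : get_birth_place_alt n = "Tallinn" := by
  unfold get_birth_place_alt
  rw [if_neg (by omega : ¬¬((1:Int) ≤ n ∧ n ≤ 999))]
  have hb : bsearchB n 5 0 thresholdsB.length = 2 := by
    rw [show thresholdsB.length = 14 by rfl,
      bs_gt n 4 0 14 (by norm_num) (by norm_num [thresholdsB]; omega),
      bs_gt n 3 0 7 (by norm_num) (by norm_num [thresholdsB]; omega),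
      bs_le n 2 0 3 (by norm_num) (by norm_num [thresholdsB]; omega),
      bs_gt n 1 2 3 (by norm_num) (by norm_num [thresholdsB]; omega),
      bs_done n 0 2 2 (by norm_num)]
  rw [hb]
  rfl

theorem pvA_3 (n : Int) (h1 : (221:Int) ≤ n) (h2 : n < 271) : get_birth_place n = "Kohtla-Järve" := by
  unfold get_birth_place tableA
  rw [if_pos (by omega : (1:Int) ≤ n ∧ n ≤ 999),
    loopA_neg n 1 11 _ _ (by omega),
    loopA_neg n 11 21 _ _ (by omega),
    loopA_neg n 21 221 _ _ (by omega),
    loopA_pos n 221 271 _ _ ⟨by omega, by omega⟩]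
  rfl

theorem pvB_3 (n : Int) (h1 : (221:Int) ≤ n) (h2 : n < 271) : get_birth_place_alt n = "Kohtla-Järve" := by
  unfold get_birth_place_alt
  rw [if_neg (by omega : ¬¬((1:Int) ≤ n ∧ n ≤ 999))]
  have hb : bsearchB n 5 0 thresholdsB.length = 3 := by
    rw [show thresholdsB.length = 14 by rfl,
      bs_gt n 4 0 14 (by norm_num) (by norm_num [thresholdsB]; omega),
      bs_gt n 3 0 7 (by norm_num) (by norm_num [thresholdsB]; omega),
      bs_le n 2 0 3 (by norm_num) (by norm_num [thresholdsB]; omega),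
      bs_le n 1 2 3 (by norm_num) (by norm_num [thresholdsB]; omega),
      bs_done n 0 3 3 (by norm_num)]
  rw [hb]
  rfl

theorem pvA_4 (n : Int) (h1 : (271:Int) ≤ n) (h2 : n < 371) : get_birth_place n = "Tartu" := by
  unfold get_birth_place tableA
  rw [if_pos (by omega : (1:Int) ≤ n ∧ n ≤ 999),
    loopA_neg n 1 11 _ _ (by omega),
    loopA_neg n 11 21 _ _ (by omega),
    loopA_neg n 21 221 _ _ (by omega),
    loopA_neg n 221 271 _ _ (by omega),
    loopA_pos n 271 371 _ _ ⟨by omega, by omega⟩]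
  rfl

theorem pvB_4 (n : Int) (h1 : (271:Int) ≤ n) (h2 : n < 371) : get_birth_place_alt n = "Tartu" := by
  unfold get_birth_place_alt
  rw [if_neg (by omega : ¬¬((1:Int) ≤ n ∧ n ≤ 999))]
  have hb : bsearchB n 5 0 thresholdsB.length = 4 := by
    rw [show thresholdsB.length = 14 by rfl,
      bs_gt n 4 0 14 (by norm_num) (by norm_num [thresholdsB]; omega),
      bs_le n 3 0 7 (by norm_num) (by norm_num [thresholdsB]; omega),
      bs_gt n 2 4 7 (by norm_num) (by norm_num [thresholdsB]; omega),
      bs_gt n 1 4 5 (by norm_num) (by norm_num [thresholdsB]; omega),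
      bs_done n 0 4 4 (by norm_num)]
  rw [hb]
  rfl

theorem pvA_5 (n : Int) (h1 : (371:Int) ≤ n) (h2 : n < 421) : get_birth_place n = "Narva" := by
  unfold get_birth_place tableA
  rw [if_pos (by omega : (1:Int) ≤ n ∧ n ≤ 999),
    loopA_neg n 1 11 _ _ (by omega),
    loopA_neg n 11 21 _ _ (by omega),
    loopA_neg n 21 221 _ _ (by omega),
    loopA_neg n 221 271 _ _ (by omega),
    loopA_neg n 271 371 _ _ (by omega),
    loopA_pos n 371 421 _ _ ⟨by omega, by omega⟩]
  rfl

theorem pvB_5 (n : Int) (h1 : (371:Int) ≤ n) (h2 : n < 421) : get_birth_place_alt n = "Narva" := by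
  unfold get_birth_place_alt
  rw [if_neg (by omega : ¬¬((1:Int) ≤ n ∧ n ≤ 999))]
  have hb : bsearchB n 5 0 thresholdsB.length = 5 := by
    rw [show thresholdsB.length = 14 by rfl,
      bs_gt n 4 0 14 (by norm_num) (by norm_num [thresholdsB]; omega),
      bs_le n 3 0 7 (by norm_num) (by norm_num [thresholdsB]; omega),
      bs_gt n 2 4 7 (by norm_num) (by norm_num [thresholdsB]; omega),
      bs_le n 1 4 5 (by norm_num) (by norm_num [thresholdsB]; omega),
      bs_done n 0 5 5 (by norm_num)]
  rw [hb]
  rfl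

theorem pvA_6 (n : Int) (h1 : (421:Int) ≤ n) (h2 : n < 471) : get_birth_place n = "Pärnu" := by
  unfold get_birth_place tableA
  rw [if_pos (by omega : (1:Int) ≤ n ∧ n ≤ 999),
    loopA_neg n 1 11 _ _ (by omega),
    loopA_neg n 11 21 _ _ (by omega),
    loopA_neg n 21 221 _ _ (by omega),
    loopA_neg n 221 271 _ _ (by omega),
    loopA_neg n 271 371 _ _ (by omega),
    loopA_neg n 371 421 _ _ (by omega),
    loopA_pos n 421 471 _ _ ⟨by omega, by omega⟩]
  rfl

theorem pvB_6 (n : Int) (h1 : (421:Int) ≤ n) (h2 : n < 471) : get_birth_place_alt n = "Pärnu" := by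
  unfold get_birth_place_alt
  rw [if_neg (by omega : ¬¬((1:Int) ≤ n ∧ n ≤ 999))]
  have hb : bsearchB n 5 0 thresholdsB.length = 6 := by
    rw [show thresholdsB.length = 14 by rfl,
      bs_gt n 4 0 14 (by norm_num) (by norm_num [thresholdsB]; omega),
      bs_le n 3 0 7 (by norm_num) (by norm_num [thresholdsB]; omega),
      bs_le n 2 4 7 (by norm_num) (by norm_num [thresholdsB]; omega),
      bs_gt n 1 6 7 (by norm_num) (by norm_num [thresholdsB]; omega),
      bs_done n 0 6 6 (by norm_num)]
  rw [hb]
  rfl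

theorem pvA_7 (n : Int) (h1 : (471:Int) ≤ n) (h2 : n < 491) : get_birth_place n = "Tallinn" := by
  unfold get_birth_place tableA
  rw [if_pos (by omega : (1:Int) ≤ n ∧ n ≤ 999),
    loopA_neg n 1 11 _ _ (by omega),
    loopA_neg n 11 21 _ _ (by omega),
    loopA_neg n 21 221 _ _ (by omega),
    loopA_neg n 221 271 _ _ (by omega),
    loopA_neg n 271 371 _ _ (by omega),
    loopA_neg n 371 421 _ _ (by omega),
    loopA_neg n 421 471 _ _ (by omega),
    loopA_pos n 471 491 _ _ ⟨by omega, by omega⟩]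
  rfl

theorem pvB_7 (n : Int) (h1 : (471:Int) ≤ n) (h2 : n < 491) : get_birth_place_alt n = "Tallinn" := by
  unfold get_birth_place_alt
  rw [if_neg (by omega : ¬¬((1:Int) ≤ n ∧ n ≤ 999))]
  have hb : bsearchB n 5 0 thresholdsB.length = 7 := by
    rw [show thresholdsB.length = 14 by rfl,
      bs_gt n 4 0 14 (by norm_num) (by norm_num [thresholdsB]; omega),
      bs_le n 3 0 7 (by norm_num) (by norm_num [thresholdsB]; omega),
      bs_le n 2 4 7 (by norm_num) (by norm_num [thresholdsB]; omega),
      bs_le n 1 6 7 (by norm_num) (by norm_num [thresholdsB]; omega),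
      bs_done n 0 7 7 (by norm_num)]
  rw [hb]
  rfl

theorem pvA_8 (n : Int) (h1 : (491:Int) ≤ n) (h2 : n < 521) : get_birth_place n = "Paide" := by
  unfold get_birth_place tableA
  rw [if_pos (by omega : (1:Int) ≤ n ∧ n ≤ 999),
    loopA_neg n 1 11 _ _ (by omega),
    loopA_neg n 11 21 _ _ (by omega),
    loopA_neg n 21 221 _ _ (by omega),
    loopA_neg n 221 271 _ _ (by omega),
    loopA_neg n 271 371 _ _ (by omega),
    loopA_neg n 371 421 _ _ (by omega),
    loopA_neg n 421 471 _ _ (by omega),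
    loopA_neg n 471 491 _ _ (by omega),
    loopA_pos n 491 521 _ _ ⟨by omega, by omega⟩]
  rfl

theorem pvB_8 (n : Int) (h1 : (491:Int) ≤ n) (h2 : n < 521) : get_birth_place_alt n = "Paide" := by
  unfold get_birth_place_alt
  rw [if_neg (by omega : ¬¬((1:Int) ≤ n ∧ n ≤ 999))]
  have hb : bsearchB n 5 0 thresholdsB.length = 8 := by
    rw [show thresholdsB.length = 14 by rfl,
      bs_le n 4 0 14 (by norm_num) (by norm_num [thresholdsB]; omega),
      bs_gt n 3 8 14 (by norm_num) (by norm_num [thresholdsB]; omega),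
      bs_gt n 2 8 11 (by norm_num) (by norm_num [thresholdsB]; omega),
      bs_gt n 1 8 9 (by norm_num) (by norm_num [thresholdsB]; omega),
      bs_done n 0 8 8 (by norm_num)]
  rw [hb]
  rfl

theorem pvA_9 (n : Int) (h1 : (521:Int) ≤ n) (h2 : n < 571) : get_birth_place n = "Rakvere" := by
  unfold get_birth_place tableA
  rw [if_pos (by omega : (1:Int) ≤ n ∧ n ≤ 999),
    loopA_neg n 1 11 _ _ (by omega),
    loopA_neg n 11 21 _ _ (by omega),
    loopA_neg n 21 221 _ _ (by omega),
    loopA_neg n 221 271 _ _ (by omega),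
    loopA_neg n 271 371 _ _ (by omega),
    loopA_neg n 371 421 _ _ (by omega),
    loopA_neg n 421 471 _ _ (by omega),
    loopA_neg n 471 491 _ _ (by omega),
    loopA_neg n 491 521 _ _ (by omega),
    loopA_pos n 521 571 _ _ ⟨by omega, by omega⟩]
  rfl

theorem pvB_9 (n : Int) (h1 : (521:Int) ≤ n) (h2 : n < 571) : get_birth_place_alt n = "Rakvere" := by
  unfold get_birth_place_alt
  rw [if_neg (by omega : ¬¬((1:Int) ≤ n ∧ n ≤ 999))]
  have hb : bsearchB n 5 0 thresholdsB.length = 9 := by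
    rw [show thresholdsB.length = 14 by rfl,
      bs_le n 4 0 14 (by norm_num) (by norm_num [thresholdsB]; omega),
      bs_gt n 3 8 14 (by norm_num) (by norm_num [thresholdsB]; omega),
      bs_gt n 2 8 11 (by norm_num) (by norm_num [thresholdsB]; omega),
      bs_le n 1 8 9 (by norm_num) (by norm_num [thresholdsB]; omega),
      bs_done n 0 9 9 (by norm_num)]
  rw [hb]
  rfl

theorem pvA_10 (n : Int) (h1 : (571:Int) ≤ n) (h2 : n < 601) : get_birth_place n = "Valga" := by
  unfold get_birth_place tableA
  rw [if_pos (by omega : (1:Int) ≤ n ∧ n ≤ 999),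
    loopA_neg n 1 11 _ _ (by omega),
    loopA_neg n 11 21 _ _ (by omega),
    loopA_neg n 21 221 _ _ (by omega),
    loopA_neg n 221 271 _ _ (by omega),
    loopA_neg n 271 371 _ _ (by omega),
    loopA_neg n 371 421 _ _ (by omega),
    loopA_neg n 421 471 _ _ (by omega),
    loopA_neg n 471 491 _ _ (by omega),
    loopA_neg n 491 521 _ _ (by omega),
    loopA_neg n 521 571 _ _ (by omega),
    loopA_pos n 571 601 _ _ ⟨by omega, by omega⟩]
  rfl

theorem pvB_10 (n : Int) (h1 : (571:Int) ≤ n) (h2 : n < 601) : get_birth_place_alt n = "Valga" := by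
  unfold get_birth_place_alt
  rw [if_neg (by omega : ¬¬((1:Int) ≤ n ∧ n ≤ 999))]
  have hb : bsearchB n 5 0 thresholdsB.length = 10 := by
    rw [show thresholdsB.length = 14 by rfl,
      bs_le n 4 0 14 (by norm_num) (by norm_num [thresholdsB]; omega),
      bs_gt n 3 8 14 (by norm_num) (by norm_num [thresholdsB]; omega),
      bs_le n 2 8 11 (by norm_num) (by norm_num [thresholdsB]; omega),
      bs_gt n 1 10 11 (by norm_num) (by norm_num [thresholdsB]; omega),
      bs_done n 0 10 10 (by norm_num)]
  rw [hb]
  rfl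

theorem pvA_11 (n : Int) (h1 : (601:Int) ≤ n) (h2 : n < 651) : get_birth_place n = "Viljandi" := by
  unfold get_birth_place tableA
  rw [if_pos (by omega : (1:Int) ≤ n ∧ n ≤ 999),
    loopA_neg n 1 11 _ _ (by omega),
    loopA_neg n 11 21 _ _ (by omega),
    loopA_neg n 21 221 _ _ (by omega),
    loopA_neg n 221 271 _ _ (by omega),
    loopA_neg n 271 371 _ _ (by omega),
    loopA_neg n 371 421 _ _ (by omega),
    loopA_neg n 421 471 _ _ (by omega),
    loopA_neg n 471 491 _ _ (by omega),
    loopA_neg n 491 521 _ _ (by omega),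
    loopA_neg n 521 571 _ _ (by omega),
    loopA_neg n 571 601 _ _ (by omega),
    loopA_pos n 601 651 _ _ ⟨by omega, by omega⟩]
  rfl

theorem pvB_11 (n : Int) (h1 : (601:Int) ≤ n) (h2 : n < 651) : get_birth_place_alt n = "Viljandi" := by
  unfold get_birth_place_alt
  rw [if_neg (by omega : ¬¬((1:Int) ≤ n ∧ n ≤ 999))]
  have hb : bsearchB n 5 0 thresholdsB.length = 11 := by
    rw [show thresholdsB.length = 14 by rfl,
      bs_le n 4 0 14 (by norm_num) (by norm_num [thresholdsB]; omega),
      bs_gt n 3 8 14 (by norm_num) (by norm_num [thresholdsB]; omega),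
      bs_le n 2 8 11 (by norm_num) (by norm_num [thresholdsB]; omega),
      bs_le n 1 10 11 (by norm_num) (by norm_num [thresholdsB]; omega),
      bs_done n 0 11 11 (by norm_num)]
  rw [hb]
  rfl

theorem pvA_12 (n : Int) (h1 : (651:Int) ≤ n) (h2 : n < 711) : get_birth_place n = "Võru" := by
  unfold get_birth_place tableA
  rw [if_pos (by omega : (1:Int) ≤ n ∧ n ≤ 999),
    loopA_neg n 1 11 _ _ (by omega),
    loopA_neg n 11 21 _ _ (by omega),
    loopA_neg n 21 221 _ _ (by omega),
    loopA_neg n 221 271 _ _ (by omega),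
    loopA_neg n 271 371 _ _ (by omega),
    loopA_neg n 371 421 _ _ (by omega),
    loopA_neg n 421 471 _ _ (by omega),
    loopA_neg n 471 491 _ _ (by omega),
    loopA_neg n 491 521 _ _ (by omega),
    loopA_neg n 521 571 _ _ (by omega),
    loopA_neg n 571 601 _ _ (by omega),
    loopA_neg n 601 651 _ _ (by omega),
    loopA_pos n 651 711 _ _ ⟨by omega, by omega⟩]
  rfl

theorem pvB_12 (n : Int) (h1 : (651:Int) ≤ n) (h2 : n < 711) : get_birth_place_alt n = "Võru" := by
  unfold get_birth_place_alt
  rw [if_neg (by omega : ¬¬((1:Int) ≤ n ∧ n ≤ 999))]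
  have hb : bsearchB n 5 0 thresholdsB.length = 12 := by
    rw [show thresholdsB.length = 14 by rfl,
      bs_le n 4 0 14 (by norm_num) (by norm_num [thresholdsB]; omega),
      bs_le n 3 8 14 (by norm_num) (by norm_num [thresholdsB]; omega),
      bs_gt n 2 12 14 (by norm_num) (by norm_num [thresholdsB]; omega),
      bs_gt n 1 12 13 (by norm_num) (by norm_num [thresholdsB]; omega),
      bs_done n 0 12 12 (by norm_num)]
  rw [hb]
  rfl

theorem pvA_13 (n : Int) (h1 : (711:Int) ≤ n) (h2 : n < 1000) : get_birth_place n = "undefined" := by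
  unfold get_birth_place tableA
  rw [if_pos (by omega : (1:Int) ≤ n ∧ n ≤ 999),
    loopA_neg n 1 11 _ _ (by omega),
    loopA_neg n 11 21 _ _ (by omega),
    loopA_neg n 21 221 _ _ (by omega),
    loopA_neg n 221 271 _ _ (by omega),
    loopA_neg n 271 371 _ _ (by omega),
    loopA_neg n 371 421 _ _ (by omega),
    loopA_neg n 421 471 _ _ (by omega),
    loopA_neg n 471 491 _ _ (by omega),
    loopA_neg n 491 521 _ _ (by omega),
    loopA_neg n 521 571 _ _ (by omega),
    loopA_neg n 571 601 _ _ (by omega),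
    loopA_neg n 601 651 _ _ (by omega),
    loopA_neg n 651 711 _ _ (by omega),
    loopA_pos n 710 1000 _ _ ⟨by omega, by omega⟩]
  rfl

theorem pvB_13 (n : Int) (h1 : (711:Int) ≤ n) (h2 : n < 1000) : get_birth_place_alt n = "undefined" := by
  unfold get_birth_place_alt
  rw [if_neg (by omega : ¬¬((1:Int) ≤ n ∧ n ≤ 999))]
  have hb : bsearchB n 5 0 thresholdsB.length = 13 := by
    rw [show thresholdsB.length = 14 by rfl,
      bs_le n 4 0 14 (by norm_num) (by norm_num [thresholdsB]; omega),
      bs_le n 3 8 14 (by norm_num) (by norm_num [thresholdsB]; omega),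
      bs_gt n 2 12 14 (by norm_num) (by norm_num [thresholdsB]; omega),
      bs_le n 1 12 13 (by norm_num) (by norm_num [thresholdsB]; omega),
      bs_done n 0 13 13 (by norm_num)]
  rw [hb]
  rfl

theorem agree_in (n : Int) (h1 : 1 ≤ n) (h2 : n ≤ 999) :
    get_birth_place n = get_birth_place_alt n := by
  rcases (show ((1:Int) ≤ n ∧ n < 11) ∨ ((11:Int) ≤ n ∧ n < 21) ∨ ((21:Int) ≤ n ∧ n < 221) ∨ ((221:Int) ≤ n ∧ n < 271) ∨ ((271:Int) ≤ n ∧ n < 371) ∨ ((371:Int) ≤ n ∧ n < 421) ∨ ((421:Int) ≤ n ∧ n < 471) ∨ ((471:Int) ≤ n ∧ n < 491) ∨ ((491:Int) ≤ n ∧ n < 521) ∨ ((521:Int) ≤ n ∧ n < 571) ∨ ((571:Int) ≤ n ∧ n < 601) ∨ ((601:Int) ≤ n ∧ n < 651) ∨ ((651:Int) ≤ n ∧ n < 711) ∨ ((711:Int) ≤ n ∧ n < 1000) by omega) with h0 | h1 | h2 | h3 | h4 | h5 | h6 | h7 | h8 | h9 | h10 | h11 | h12 | h13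
  · rw [pvA_0 n h0.1 h0.2, pvB_0 n h0.1 h0.2]
  · rw [pvA_1 n h1.1 h1.2, pvB_1 n h1.1 h1.2]
  · rw [pvA_2 n h2.1 h2.2, pvB_2 n h2.1 h2.2]
  · rw [pvA_3 n h3.1 h3.2, pvB_3 n h3.1 h3.2]
  · rw [pvA_4 n h4.1 h4.2, pvB_4 n h4.1 h4.2]
  · rw [pvA_5 n h5.1 h5.2, pvB_5 n h5.1 h5.2]
  · rw [pvA_6 n h6.1 h6.2, pvB_6 n h6.1 h6.2]
  · rw [pvA_7 n h7.1 h7.2, pvB_7 n h7.1 h7.2]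
  · rw [pvA_8 n h8.1 h8.2, pvB_8 n h8.1 h8.2]
  · rw [pvA_9 n h9.1 h9.2, pvB_9 n h9.1 h9.2]
  · rw [pvA_10 n h10.1 h10.2, pvB_10 n h10.1 h10.2]
  · rw [pvA_11 n h11.1 h11.2, pvB_11 n h11.1 h11.2]
  · rw [pvA_12 n h12.1 h12.2, pvB_12 n h12.1 h12.2]
  · rw [pvA_13 n h13.1 h13.2, pvB_13 n h13.1 h13.2]

-- ===== VERDICT (by name: the statement is the Claim_ definition above) =====
theorem get_birth_place_spec : Claim_equal_get_birth_place := by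
  intro n _
  unfold Spec_get_birth_place
  by_cases h : 1 ≤ n ∧ n ≤ 999
  · exact agree_in n h.1 h.2
  · simp [get_birth_place, get_birth_place_alt, h]
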